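-- pv_equiv track=rewrite | github.com/Trillom11/AVATINHA.-DESIGN-OF-A-SOCIAL-AND-OPEN-ROBOTIC-AVATAR | Software/raspberry/emociones_matriz2.py | generar_fases_parpadeo
-- ===== SOURCE A (Python) =====
-- def generar_fases_parpadeo(ojo_abierto):
--     fase_list = []
--     for i in range(1, 5):
--         fase = ["00000000" for _ in range(8)]
--         for j in range(i, 8 - i):
--             fase[j] = ojo_abierto[j]
--         fase_list.append(fase)
--     return fase_list + fase_list[::-1]
-- ===== SOURCE B (Python) =====
-- def generar_fases_parpadeo(ojo_abierto):
--     # progressive masking: start from the fully open frame (rows 0 and 7 shut),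
--     # close one more row from each side per phase, then mirror for re-opening
--     cur = ["00000000"] + ojo_abierto[1:7] + ["00000000"]
--     fases = []
--     for i in range(1, 5):
--         cur[i - 1] = "00000000"
--         cur[8 - i] = "00000000"
--         fases.append(cur[:])
--     return fases + fases[::-1]
-- ===== Notes on version B (the rewrite author's own statement) =====
-- stated objective: alternative
-- what changed: B derives each blink phase from the previous frame by masking one more row on each side (in-place slice copy per step), instead of rebuilding an all-zero frame and re-copying the middle band each iteration.
import Mathlib
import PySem

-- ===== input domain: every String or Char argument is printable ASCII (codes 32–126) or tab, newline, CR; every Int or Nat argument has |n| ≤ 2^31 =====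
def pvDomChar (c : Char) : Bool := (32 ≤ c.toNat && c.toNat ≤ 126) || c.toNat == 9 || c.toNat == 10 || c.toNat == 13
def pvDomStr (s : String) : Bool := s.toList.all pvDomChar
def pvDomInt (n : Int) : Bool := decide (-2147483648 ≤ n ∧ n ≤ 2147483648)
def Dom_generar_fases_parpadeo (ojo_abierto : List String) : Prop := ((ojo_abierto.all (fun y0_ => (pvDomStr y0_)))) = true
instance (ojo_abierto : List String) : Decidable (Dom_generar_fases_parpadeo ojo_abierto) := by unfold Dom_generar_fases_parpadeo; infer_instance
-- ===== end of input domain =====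

-- B builds each phase from the previous frame by masking one more row per side; A rebuilds each frame from zeros. Equivalence of the returned value on lists with at least 7 rows (both programs raise IndexError below that).

-- ===== PORT A =====
def generar_fases_parpadeo (ojo_abierto : List String) : List (List String) :=
  let fase_list := (PySem.List.pyRange 1 5 1).foldl (fun fase_list i =>
    let fase := (List.range 8).map (fun _ => "00000000")
    let fase := (PySem.List.pyRange i (8 - i) 1).foldl (fun fase j =>
      -- fase[j] = ojo_abierto[j]; j ∈ [1,7) so the write is in range; the read raises
      -- (pyGet? = none) iff ojo_abierto is shorter than 7 — excluded by Pre_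
      fase.set j.toNat ((PySem.List.pyGet? ojo_abierto j).getD "00000000")) fase
    fase_list ++ [fase]) []
  fase_list ++ fase_list.reverse

-- ===== PORT B =====
def generar_fases_parpadeo_alt (ojo_abierto : List String) : List (List String) :=
  let cur := ["00000000"] ++ PySem.List.slice ojo_abierto (some 1) (some 7) ++ ["00000000"]
  let st := (PySem.List.pyRange 1 5 1).foldl
    (fun (st : List String × List (List String)) i =>
      let cur := st.1.set (i - 1).toNat "00000000"
      let cur := cur.set (8 - i).toNat "00000000"
      (cur, st.2 ++ [cur])) (cur, [])
  st.2 ++ st.2.reverse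

-- ===== PRECONDITION & SPEC =====
-- Both A and B raise IndexError when ojo_abierto has fewer than 7 rows.
def Pre_generar_fases_parpadeo (ojo_abierto : List String) : Prop := 7 ≤ ojo_abierto.length
instance (ojo_abierto : List String) : Decidable (Pre_generar_fases_parpadeo ojo_abierto) := by unfold Pre_generar_fases_parpadeo; infer_instance
def pvWitness_generar_fases_parpadeo : List String := ["11111111","11100111","11011011","10111101","10111101","11011011","11100111","11111111"]

def Spec_generar_fases_parpadeo (ojo_abierto : List String) (out : List (List String)) : Prop := out = generar_fases_parpadeo_alt ojo_abierto
instance (ojo_abierto : List String) (out : List (List String)) : Decidable (Spec_generar_fases_parpadeo ojo_abierto out) := by unfold Spec_generar_fases_parpadeo; infer_instance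

-- ===== CLAIM (what is proved, stated in full; the proofs are below) =====
def Claim_equal_generar_fases_parpadeo : Prop := ∀ (ojo_abierto : List String), Dom_generar_fases_parpadeo ojo_abierto → Pre_generar_fases_parpadeo ojo_abierto → Spec_generar_fases_parpadeo ojo_abierto (generar_fases_parpadeo ojo_abierto)

-- ===== LEMMAS AND PROOFS =====

-- ===== VERDICT (by name: the statement is the Claim_ definition above) =====
theorem generar_fases_parpadeo_spec : Claim_equal_generar_fases_parpadeo := by
  intro l hdom hpre
  unfold Pre_generar_fases_parpadeo at hpre
  obtain ⟨a0, a1, a2, a3, a4, a5, a6, rest, rfl⟩ :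
      ∃ a0 a1 a2 a3 a4 a5 a6 rest, l = a0 :: a1 :: a2 :: a3 :: a4 :: a5 :: a6 :: rest := by
    match l, hpre with
    | a0 :: a1 :: a2 :: a3 :: a4 :: a5 :: a6 :: rest, _ =>
      exact ⟨a0, a1, a2, a3, a4, a5, a6, rest, rfl⟩
  show generar_fases_parpadeo _ = generar_fases_parpadeo_alt _
  simp [generar_fases_parpadeo, generar_fases_parpadeo_alt,
    PySem.List.pyRange, PySem.List.slice,
    PySem.List.clampIdx, List.foldl, List.range, List.range.loop]
  simp [PySem.List.pyGet?_of_nonneg]
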